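-- pv_equiv track=rewrite | github.com/backupassure/proxmigrate | apps/lxc/views.py | _parse_ct_mp
-- ===== SOURCE A (Python) =====
-- def _parse_ct_mp(interface, raw_value):
--     """Parse a mount point string like '/mnt/data,mp=/data,size=50G'."""
--     if not raw_value:
--         return None
--     parts = raw_value.split(",")
--     location = parts[0]
--     options = {k: v for p in parts[1:] if "=" in p for k, v in [p.split("=", 1)]}
--     storage = location.split(":")[0] if ":" in location else location
--     return {
--         "mount": interface,
--         "storage": storage,
--         "size": options.get("size", "—"),
--     }
-- ===== SOURCE B (Python) =====
-- def _parse_ct_mp(interface, raw_value):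
--     """Parse a mount point string like '/mnt/data,mp=/data,size=50G'."""
--     if not raw_value:
--         return None
--     parts = raw_value.split(",")
--     location = parts[0]
--     storage = location.split(":")[0] if ":" in location else location
--     size = "\u2014"
--     for p in reversed(parts[1:]):
--         if p.startswith("size="):
--             size = p[5:]
--             break
--     return {"mount": interface, "storage": storage, "size": size}
-- ===== Notes on version B (the rewrite author's own statement) =====
-- stated objective: simpler
-- what changed: Instead of building a dict of every 'k=v' option and then looking up 'size', B scans the comma parts backwards and returns the first (i.e. Python-last) part that starts with 'size=', stripped of its prefix.
import Mathlib
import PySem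

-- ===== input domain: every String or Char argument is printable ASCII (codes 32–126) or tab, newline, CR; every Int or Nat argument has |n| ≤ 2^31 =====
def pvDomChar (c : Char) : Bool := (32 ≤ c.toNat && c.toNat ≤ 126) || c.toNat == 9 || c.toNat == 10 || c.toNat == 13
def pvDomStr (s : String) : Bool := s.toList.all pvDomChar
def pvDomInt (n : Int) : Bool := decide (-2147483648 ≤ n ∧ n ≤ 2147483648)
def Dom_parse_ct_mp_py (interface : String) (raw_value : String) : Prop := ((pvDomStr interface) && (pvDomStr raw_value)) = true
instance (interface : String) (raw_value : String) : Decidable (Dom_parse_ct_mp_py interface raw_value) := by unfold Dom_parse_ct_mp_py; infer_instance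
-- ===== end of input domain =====

-- B replaces A's "build a dict of all k=v options, then look up 'size'" with a single
-- backwards scan of the comma parts for the last 'size=' entry (objective: simpler).


-- ===== PORT A =====
def parse_ct_mp_py (interface : String) (raw_value : String) : Option (List (String × String)) :=
  if raw_value = "" then none
  else
    let parts := (PySem.Str.split? raw_value ",").getD []   -- sep "," ≠ "", so split? is always some
    let location := PySem.List.pyGetD parts 0 ""            -- parts[0]; split never yields []
    let options : PySem.Dict String String :=
      (parts.drop 1).foldl (fun d p =>
        if PySem.Str.isIn "=" p then
          match PySem.Str.splitMax? p "=" 1 with             -- p.split("=", 1)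
          | some (k :: v :: _) => d.insert k v               -- with "=" in p this is exactly [k, v]
          | _ => d                                           -- unreachable totality guard
        else d) PySem.Dict.empty
    let storage := if PySem.Str.isIn ":" location then
        PySem.List.pyGetD ((PySem.Str.split? location ":").getD []) 0 "" else location
    some [("mount", interface), ("storage", storage), ("size", options.getD "size" "—")]

-- ===== PORT B =====
-- 'for p in reversed(parts[1:]): if p.startswith("size="): size = p[5:]; break' with size = "—" when the loop finds nothing
def pvFindSize : List String → String
  | [] => "—"
  | p :: rest => if PySem.Str.startswith p "size=" then PySem.Str.slice p (some 5) none else pvFindSize rest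

def parse_ct_mp_py_alt (interface : String) (raw_value : String) : Option (List (String × String)) :=
  if raw_value = "" then none
  else
    let parts := (PySem.Str.split? raw_value ",").getD []
    let location := PySem.List.pyGetD parts 0 ""
    let storage := if PySem.Str.isIn ":" location then
        PySem.List.pyGetD ((PySem.Str.split? location ":").getD []) 0 "" else location
    some [("mount", interface), ("storage", storage), ("size", pvFindSize (parts.drop 1).reverse)]

-- ===== PRECONDITION & SPEC =====
def Spec_parse_ct_mp_py (interface : String) (raw_value : String) (out : Option (List (String × String))) : Prop := out = parse_ct_mp_py_alt interface raw_value
instance (interface : String) (raw_value : String) (out : Option (List (String × String))) : Decidable (Spec_parse_ct_mp_py interface raw_value out) := by unfold Spec_parse_ct_mp_py; infer_instance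

-- ===== CLAIM (what is proved, stated in full; the proofs are below) =====
def Claim_equal_parse_ct_mp_py : Prop := ∀ (interface : String) (raw_value : String), Dom_parse_ct_mp_py interface raw_value → Spec_parse_ct_mp_py interface raw_value (parse_ct_mp_py interface raw_value)

-- ===== LEMMAS AND PROOFS =====

-- pvFindSize with an arbitrary fallback instead of the literal "—"
def pvFindSizeD : List String → String → String
  | [], dflt => dflt
  | p :: rest, dflt => if PySem.Str.startswith p "size=" then PySem.Str.slice p (some 5) none else pvFindSizeD rest dflt

lemma pvFindSize_eq_pvFindSizeD (l : List String) : pvFindSize l = pvFindSizeD l "—" := by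
  induction l with
  | nil => rfl
  | cons p rest ih => simp [pvFindSize, pvFindSizeD, ih]

lemma pvFindSizeD_append (l : List String) (p : String) (dflt : String) :
    pvFindSizeD (l ++ [p]) dflt
      = pvFindSizeD l (if PySem.Str.startswith p "size=" then PySem.Str.slice p (some 5) none else dflt) := by
  induction l with
  | nil => simp [pvFindSizeD]
  | cons q rest ih => simp [pvFindSizeD, ih]

-- splitOnMax.go with m = 0 just flushes
lemma pvGo_zero (fuel : Nat) (l cur : List Char) (acc : List (List Char)) :
    PySem.Chars.splitOnMax.go ['='] fuel 0 l cur acc = ((cur.reverse ++ l) :: acc).reverse := by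
  cases fuel with
  | zero => rfl
  | succ f => cases l with
    | nil => simp [PySem.Chars.splitOnMax.go]
    | cons c rest => simp [PySem.Chars.splitOnMax.go]

-- splitOnMax.go with maxsplit 1 and sep "=" splits at the first '='
lemma pvGo_one (l : List Char) : ∀ (cur : List Char) (acc : List (List Char)) (fuel : Nat), l.length < fuel →
    PySem.Chars.splitOnMax.go ['='] fuel 1 l cur acc =
      if '=' ∈ l
      then acc.reverse ++ [cur.reverse ++ l.takeWhile (· ≠ '='), (l.dropWhile (· ≠ '=')).drop 1]
      else acc.reverse ++ [cur.reverse ++ l] := by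
  induction l with
  | nil =>
    intro cur acc fuel h
    cases fuel with
    | zero => omega
    | succ f => simp [PySem.Chars.splitOnMax.go]
  | cons c rest ih =>
    intro cur acc fuel h
    cases fuel with
    | zero => omega
    | succ f =>
      by_cases hc : c = '='
      · subst hc
        have hp : (['='] : List Char).isPrefixOf ('=' :: rest) = true := by simp [List.isPrefixOf]
        rw [PySem.Chars.splitOnMax.go]
        simp only [hp, if_neg (by omega : ¬(1 : Nat) = 0), if_true]
        rw [pvGo_zero]
        simp
      · have hpre : (['='] : List Char).isPrefixOf (c :: rest) = false := by
          simp [List.isPrefixOf]; exact fun h' => hc h'.symm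
        rw [PySem.Chars.splitOnMax.go]
        simp only [hpre, if_neg (by omega : ¬(1 : Nat) = 0)]
        rw [ih (c :: cur) acc f (by simpa using Nat.lt_of_succ_lt_succ h)]
        simp [hc, Ne.symm hc]

-- Python's p.split("=", 1) for a p that contains '='
lemma pvSplitMax_char (p : String) (h : '=' ∈ p.toList) :
    PySem.Str.splitMax? p "=" 1 =
      some [String.ofList (p.toList.takeWhile (· ≠ '=')),
            String.ofList ((p.toList.dropWhile (· ≠ '=')).drop 1)] := by
  have : PySem.Chars.splitMax? p.toList ['='] 1 =
      some [p.toList.takeWhile (· ≠ '='), (p.toList.dropWhile (· ≠ '=')).drop 1] := by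
    simp only [PySem.Chars.splitMax?, PySem.Chars.splitOnMax, List.isEmpty_cons,
      if_neg (by omega : ¬(1 : Int) < 0), Bool.false_eq_true, if_false, Int.toNat_one]
    rw [pvGo_one p.toList [] [] (p.toList.length + 1) (Nat.lt_succ_self _)]
    simp [h]
  simp [PySem.Str.splitMax?, this]

lemma pvIsIn_eq (p : String) : PySem.Str.isIn "=" p = true ↔ '=' ∈ p.toList := by
  rw [PySem.Str.isIn_iff_infix]
  exact List.singleton_infix_iff '=' p.toList

lemma pvStarts (p : String) : PySem.Str.startswith p "size=" = true ↔ "size=".toList <+: p.toList := by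
  simp [PySem.Str.startswith, PySem.Chars.startswith, List.isPrefixOf_iff_prefix]

-- the heart: one step of A's dict loop, observed at key "size", is one step of B's scan
lemma pvStep (d : PySem.Dict String String) (p : String) :
    (if PySem.Str.isIn "=" p then
        match PySem.Str.splitMax? p "=" 1 with
        | some (k :: v :: _) => d.insert k v
        | _ => d
      else d).getD "size" "—"
      = if PySem.Str.startswith p "size=" then PySem.Str.slice p (some 5) none
        else d.getD "size" "—" := by
  by_cases hmem : '=' ∈ p.toList
  · rw [if_pos ((pvIsIn_eq p).2 hmem), pvSplitMax_char p hmem]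
    by_cases hs : PySem.Str.startswith p "size=" = true
    · obtain ⟨r, hr⟩ := (pvStarts p).1 hs
      rw [if_pos hs]
      have hlist : p.toList = 's' :: 'i' :: 'z' :: 'e' :: '=' :: r := by
        rw [← hr]; rfl
      have htk : p.toList.takeWhile (· ≠ '=') = ['s','i','z','e'] := by
        rw [hlist]; simp
      have hdw : p.toList.dropWhile (· ≠ '=') = '=' :: r := by
        rw [hlist]; simp
      simp only [htk, hdw, List.drop_succ_cons, List.drop_zero]
      have hkey : String.ofList ['s','i','z','e'] = "size" := by decide
      rw [hkey, PySem.Dict.getD_insert_self]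
      simp only [PySem.Str.slice, PySem.Chars.slice_eq_listSlice, hlist,
        PySem.List.slice_from _ (by norm_num : (0:Int) ≤ 5)]
      rfl
    · rw [if_neg hs]
      have hne : ("size" : String) ≠ String.ofList (p.toList.takeWhile (· ≠ '=')) := by
        intro he
        have htk : p.toList.takeWhile (· ≠ '=') = "size".toList := by
          have := congrArg String.toList he
          simpa using this.symm
        have hdwne : p.toList.dropWhile (· ≠ '=') ≠ [] := by
          intro hnil
          have := List.dropWhile_eq_nil_iff.mp hnil '=' hmem
          simp at this
        obtain ⟨a, t, hat⟩ := List.exists_cons_of_ne_nil hdwne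
        have hhead := List.head_dropWhile_not (l := p.toList) (p := (· ≠ '=')) hdwne
        have hat' : List.dropWhile (fun x => !decide (x = '=')) p.toList = a :: t := by
          simpa using hat
        have ha : a = '=' := by simpa [hat'] using hhead
        have : "size=".toList <+: p.toList := by
          refine ⟨t, ?_⟩
          calc "size=".toList ++ t
              = "size".toList ++ '=' :: t := by rfl
            _ = p.toList.takeWhile (· ≠ '=') ++ p.toList.dropWhile (· ≠ '=') := by
                rw [htk, hat, ha]
            _ = p.toList := List.takeWhile_append_dropWhile
        exact hs ((pvStarts p).2 this)
      rw [PySem.Dict.getD_insert]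
      rw [if_neg hne]
  · have h1 : PySem.Str.isIn "=" p = false := by
      cases hb : PySem.Str.isIn "=" p
      · rfl
      · exact absurd ((pvIsIn_eq p).1 hb) hmem
    have h2 : PySem.Str.startswith p "size=" = false := by
      cases hb : PySem.Str.startswith p "size="
      · rfl
      · exfalso
        obtain ⟨r, hr⟩ := (pvStarts p).1 hb
        exact hmem (by rw [← hr]; simp)
    simp only [h1, h2, Bool.false_eq_true, if_false]

-- A's whole dict loop, observed at key "size", is B's backwards scan
lemma pvLoop (ps : List String) : ∀ (d : PySem.Dict String String),
    (ps.foldl (fun d p =>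
        if PySem.Str.isIn "=" p then
          match PySem.Str.splitMax? p "=" 1 with
          | some (k :: v :: _) => d.insert k v
          | _ => d
        else d) d).getD "size" "—"
      = pvFindSizeD ps.reverse (d.getD "size" "—") := by
  induction ps with
  | nil => intro d; rfl
  | cons p rest ih =>
    intro d
    rw [List.foldl_cons, ih, List.reverse_cons, pvFindSizeD_append, pvStep]

-- ===== VERDICT (by name: the statement is the Claim_ definition above) =====
theorem parse_ct_mp_py_spec : Claim_equal_parse_ct_mp_py := by
  intro interface raw_value _
  unfold Spec_parse_ct_mp_py parse_ct_mp_py parse_ct_mp_py_alt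
  by_cases h : raw_value = ""
  · simp [h]
  · simp only [if_neg h]
    rw [pvLoop, pvFindSize_eq_pvFindSizeD]
    rfl
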